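-- pv_equiv track=rewrite | github.com/geekshant/ACC45DAYSOFCODE-2024 | DAY10-Weights.py | can_measure_weight
-- ===== SOURCE A (Python) =====
-- def can_measure_weight(W, X, Y, Z):
--     weights = [X, Y, Z]
--     for i in range(1 << len(weights)):
--         sum_weights = 0
--         for j in range(len(weights)):
--             if i & (1 << j):
--                 sum_weights += weights[j]
--         if sum_weights == W:
--             return "YES"
--     return "NO"
-- ===== SOURCE B (Python) =====
-- def can_measure_weight(W, X, Y, Z):
--     def reach(t, ws):
--         if not ws:
--             return t == 0
--         return reach(t, ws[1:]) or reach(t - ws[0], ws[1:])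
--     return "YES" if reach(W, [X, Y, Z]) else "NO"
-- ===== Notes on version B (the rewrite author's own statement) =====
-- stated objective: alternative
-- what changed: Replaces the bitmask enumeration of all eight subset sums with a recursive take-or-skip backtracking search that subtracts chosen weights from the target and succeeds when the remainder is zero.
import Mathlib
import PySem

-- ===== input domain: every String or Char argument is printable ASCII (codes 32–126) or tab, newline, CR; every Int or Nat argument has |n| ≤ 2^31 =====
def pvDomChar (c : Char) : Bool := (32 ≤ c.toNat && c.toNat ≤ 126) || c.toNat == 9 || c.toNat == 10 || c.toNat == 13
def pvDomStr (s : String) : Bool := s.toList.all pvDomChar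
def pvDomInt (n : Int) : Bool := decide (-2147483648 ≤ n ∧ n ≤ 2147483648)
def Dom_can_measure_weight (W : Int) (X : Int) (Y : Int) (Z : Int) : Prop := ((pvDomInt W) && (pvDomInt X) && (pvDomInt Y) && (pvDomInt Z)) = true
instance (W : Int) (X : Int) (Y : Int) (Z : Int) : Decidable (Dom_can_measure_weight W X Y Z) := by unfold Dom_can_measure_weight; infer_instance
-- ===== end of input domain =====

-- B replaces A's bitmask enumeration of subset sums by a recursive take-or-skip
-- backtracking search on the remaining target (objective: alternative).

-- ===== PORT A =====
-- literal transliteration: loop i over range(1 << 3), inner loop j over range(3) summing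
-- weights[j] when bit j of i is set, early return "YES" modelled by an Option accumulator.
def can_measure_weight (W : Int) (X : Int) (Y : Int) (Z : Int) : String :=
  let weights := [X, Y, Z]
  ((PySem.List.pyRange 0 ((1 : Int) <<< weights.length) 1).foldl
    (fun (acc : Option String) (i : Int) =>
      match acc with
      | some r => some r
      | none =>
        let sum_weights := (PySem.List.pyRange 0 (weights.length : Int) 1).foldl
          (fun sum j =>
            if PySem.Int.band i ((1 : Int) <<< j.toNat) ≠ 0 then sum + PySem.List.pyGetD weights j 0 else sum) 0
        if sum_weights = W then some "YES" else none) none).getD "NO"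

-- ===== PORT B =====
-- the recursive take-or-skip search of Source B (structural recursion on the weight list)
def pvReach : Int → List Int → Bool
  | t, [] => t == 0
  | t, w :: ws => pvReach t ws || pvReach (t - w) ws

def can_measure_weight_alt (W : Int) (X : Int) (Y : Int) (Z : Int) : String :=
  if pvReach W [X, Y, Z] then "YES" else "NO"

-- ===== PRECONDITION & SPEC =====
def Spec_can_measure_weight (W : Int) (X : Int) (Y : Int) (Z : Int) (out : String) : Prop := out = can_measure_weight_alt W X Y Z
instance (W : Int) (X : Int) (Y : Int) (Z : Int) (out : String) : Decidable (Spec_can_measure_weight W X Y Z out) := by unfold Spec_can_measure_weight; infer_instance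

-- ===== CLAIM (what is proved, stated in full; the proofs are below) =====
def Claim_equal_can_measure_weight : Prop := ∀ (W : Int) (X : Int) (Y : Int) (Z : Int), Dom_can_measure_weight W X Y Z → Spec_can_measure_weight W X Y Z (can_measure_weight W X Y Z)

-- ===== LEMMAS AND PROOFS =====

-- Both programs are characterised by membership of W among the eight subset sums.
set_option maxHeartbeats 4000000 in
theorem A_char (W X Y Z : Int) :
    can_measure_weight W X Y Z =
      if W = 0 ∨ W = X ∨ W = Y ∨ W = X + Y ∨ W = Z ∨ W = X + Z ∨ W = Y + Z ∨ W = X + Y + Z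
      then "YES" else "NO" := by
  show ((PySem.List.pyRange 0 ((1 : Int) <<< (3 : Nat)) 1).foldl
    (fun (acc : Option String) (i : Int) =>
      match acc with
      | some r => some r
      | none =>
        let sum_weights := (PySem.List.pyRange 0 (3 : Int) 1).foldl
          (fun sum j =>
            if PySem.Int.band i ((1 : Int) <<< j.toNat) ≠ 0 then sum + PySem.List.pyGetD [X, Y, Z] j 0 else sum) 0
        if sum_weights = W then some "YES" else none) none).getD "NO" = _
  have h1 : PySem.List.pyRange 0 ((1 : Int) <<< (3 : Nat)) 1 = [0,1,2,3,4,5,6,7] := by decide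
  have h2 : PySem.List.pyRange 0 (3 : Int) 1 = [0,1,2] := by decide
  rw [h1, h2]
  simp only [List.foldl]
  norm_num [show PySem.Int.band (0:Int) ((1:Int) <<< (0:Int)) = 0 from by decide,
    show PySem.Int.band (0:Int) ((1:Int) <<< (1:Int)) = 0 from by decide,
    show PySem.Int.band (0:Int) ((1:Int) <<< (2:Int)) = 0 from by decide,
    show PySem.Int.band (1:Int) ((1:Int) <<< (0:Int)) = 1 from by decide,
    show PySem.Int.band (1:Int) ((1:Int) <<< (1:Int)) = 0 from by decide,
    show PySem.Int.band (1:Int) ((1:Int) <<< (2:Int)) = 0 from by decide,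
    show PySem.Int.band (2:Int) ((1:Int) <<< (0:Int)) = 0 from by decide,
    show PySem.Int.band (2:Int) ((1:Int) <<< (1:Int)) = 2 from by decide,
    show PySem.Int.band (2:Int) ((1:Int) <<< (2:Int)) = 0 from by decide,
    show PySem.Int.band (3:Int) ((1:Int) <<< (0:Int)) = 1 from by decide,
    show PySem.Int.band (3:Int) ((1:Int) <<< (1:Int)) = 2 from by decide,
    show PySem.Int.band (3:Int) ((1:Int) <<< (2:Int)) = 0 from by decide,
    show PySem.Int.band (4:Int) ((1:Int) <<< (0:Int)) = 0 from by decide,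
    show PySem.Int.band (4:Int) ((1:Int) <<< (1:Int)) = 0 from by decide,
    show PySem.Int.band (4:Int) ((1:Int) <<< (2:Int)) = 4 from by decide,
    show PySem.Int.band (5:Int) ((1:Int) <<< (0:Int)) = 1 from by decide,
    show PySem.Int.band (5:Int) ((1:Int) <<< (1:Int)) = 0 from by decide,
    show PySem.Int.band (5:Int) ((1:Int) <<< (2:Int)) = 4 from by decide,
    show PySem.Int.band (6:Int) ((1:Int) <<< (0:Int)) = 0 from by decide,
    show PySem.Int.band (6:Int) ((1:Int) <<< (1:Int)) = 2 from by decide,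
    show PySem.Int.band (6:Int) ((1:Int) <<< (2:Int)) = 4 from by decide,
    show PySem.Int.band (7:Int) ((1:Int) <<< (0:Int)) = 1 from by decide,
    show PySem.Int.band (7:Int) ((1:Int) <<< (1:Int)) = 2 from by decide,
    show PySem.Int.band (7:Int) ((1:Int) <<< (2:Int)) = 4 from by decide,
    PySem.List.pyGetD,
    PySem.List.pyGet?,
    PySem.List.pyIdx?,
    show Int.toNat 2 = 2 from rfl]
  split_ifs <;> simp_all <;> omega

theorem B_char (W X Y Z : Int) :
    can_measure_weight_alt W X Y Z =
      if W = 0 ∨ W = X ∨ W = Y ∨ W = X + Y ∨ W = Z ∨ W = X + Z ∨ W = Y + Z ∨ W = X + Y + Z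
      then "YES" else "NO" := by
  simp only [can_measure_weight_alt, pvReach, Bool.or_eq_true, beq_iff_eq]
  split_ifs <;> simp_all <;> omega

-- ===== VERDICT (by name: the statement is the Claim_ definition above) =====
theorem can_measure_weight_spec : Claim_equal_can_measure_weight := by
  intro W X Y Z _
  unfold Spec_can_measure_weight
  rw [A_char, B_char]
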